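-- pv_equiv track=rewrite | github.com/dfreddy/NBA-Schedule-Optimiser | read_csv.py | set_conference_divisions
-- ===== SOURCE A (Python) =====
-- def set_conference_divisions(teams):
--     out = []
--     for t in teams:
--         out_entry = {'error': 'team name missing'}
--         if t == 'Sacramento Kings' or t == 'Golden State Warriors' or t == 'LA Clippers' or t == 'Los Angeles Lakers' or t == 'Phoenix Suns':
--             out_entry = {
--                 'team': t,
--                 'conf': 'West',
--                 'div': 'Pacific'
--             }
--         if t == 'Portland Trail Blazers' or t == 'Utah Jazz' or t == 'Denver Nuggets' or t == 'Oklahoma City Thunder' or t == 'Minnesota Timberwolves':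
--             out_entry = {
--                 'team': t,
--                 'conf': 'West',
--                 'div': 'Northwest'
--             }
--         if t == 'San Antonio Spurs' or t == 'Dallas Mavericks' or t == 'Houston Rockets' or t == 'New Orleans Pelicans' or t == 'Memphis Grizzlies':
--             out_entry = {
--                 'team': t,
--                 'conf': 'West',
--                 'div': 'Southwest'
--             }
--         if t == 'Miami Heat' or t == 'Orlando Magic' or t == 'Atlanta Hawks' or t == 'Charlotte Hornets' or t == 'Washington Wizards':
--             out_entry = {
--                 'team': t,
--                 'conf': 'East',
--                 'div': 'Southeast'
--             }
--         if t == 'Milwaukee Bucks' or t == 'Chicago Bulls' or t == 'Indiana Pacers' or t == 'Detroit Pistons' or t == 'Cleveland Cavaliers':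
--             out_entry = {
--                 'team': t,
--                 'conf': 'East',
--                 'div': 'Central'
--             }
--         if t == 'Toronto Raptors' or t == 'Boston Celtics' or t == 'Brooklyn Nets' or t == 'Philadelphia 76ers' or t == 'New York Knicks':
--             out_entry = {
--                 'team': t,
--                 'conf': 'East',
--                 'div': 'Atlantic'
--             }
--         out.append(out_entry)
--     return out
-- ===== SOURCE B (Python) =====
-- # Flat 30-team roster in division order; conf/div derived from the index by
-- # arithmetic (i < 15 -> West, division = i // 5) instead of any comparison cascade.
-- _ROSTER = [
--     'Sacramento Kings', 'Golden State Warriors', 'LA Clippers', 'Los Angeles Lakers', 'Phoenix Suns',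
--     'Portland Trail Blazers', 'Utah Jazz', 'Denver Nuggets', 'Oklahoma City Thunder', 'Minnesota Timberwolves',
--     'San Antonio Spurs', 'Dallas Mavericks', 'Houston Rockets', 'New Orleans Pelicans', 'Memphis Grizzlies',
--     'Miami Heat', 'Orlando Magic', 'Atlanta Hawks', 'Charlotte Hornets', 'Washington Wizards',
--     'Milwaukee Bucks', 'Chicago Bulls', 'Indiana Pacers', 'Detroit Pistons', 'Cleveland Cavaliers',
--     'Toronto Raptors', 'Boston Celtics', 'Brooklyn Nets', 'Philadelphia 76ers', 'New York Knicks',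
-- ]
--
-- _DIV_NAMES = ['Pacific', 'Northwest', 'Southwest', 'Southeast', 'Central', 'Atlantic']
--
--
-- def set_conference_divisions(teams):
--     out = []
--     for t in teams:
--         try:
--             i = _ROSTER.index(t)
--         except ValueError:
--             out.append({'error': 'team name missing'})
--             continue
--         out.append({
--             'team': t,
--             'conf': 'West' if i < 15 else 'East',
--             'div': _DIV_NAMES[i // 5],
--         })
--     return out
-- ===== Notes on version B (the rewrite author's own statement) =====
-- stated objective: alternative
-- what changed: Replaces the six overwrite-on-match comparison cascades by a flat 30-team roster in division order: each team's conference and division are DERIVED arithmetically from its roster index (West iff index < 15, division name = names[index // 5]) instead of being stored or compared per group.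
import Mathlib
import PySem

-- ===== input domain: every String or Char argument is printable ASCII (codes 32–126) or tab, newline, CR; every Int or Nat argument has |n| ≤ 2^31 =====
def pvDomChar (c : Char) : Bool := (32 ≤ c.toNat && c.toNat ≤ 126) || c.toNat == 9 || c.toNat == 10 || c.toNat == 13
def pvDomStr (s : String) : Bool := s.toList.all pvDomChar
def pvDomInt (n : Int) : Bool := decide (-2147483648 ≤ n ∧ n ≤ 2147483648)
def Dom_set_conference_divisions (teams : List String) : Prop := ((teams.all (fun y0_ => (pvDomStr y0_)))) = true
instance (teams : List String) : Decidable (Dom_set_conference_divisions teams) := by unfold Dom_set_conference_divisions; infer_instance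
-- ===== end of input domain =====

-- B replaces A's six overwrite-on-match comparison cascades with a flat 30-team roster
-- in division order, deriving conf/div arithmetically from the roster index (alternative).


-- ===== PORT A =====
-- loop body of A: the default entry then the six if-overwrites, in order
def pvAEntry (t : String) : List (String × String) :=
  let out_entry := [("error", "team name missing")]
  let out_entry := if t = "Sacramento Kings" ∨ t = "Golden State Warriors" ∨ t = "LA Clippers" ∨ t = "Los Angeles Lakers" ∨ t = "Phoenix Suns" then
      [("team", t), ("conf", "West"), ("div", "Pacific")] else out_entry
  let out_entry := if t = "Portland Trail Blazers" ∨ t = "Utah Jazz" ∨ t = "Denver Nuggets" ∨ t = "Oklahoma City Thunder" ∨ t = "Minnesota Timberwolves" then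
      [("team", t), ("conf", "West"), ("div", "Northwest")] else out_entry
  let out_entry := if t = "San Antonio Spurs" ∨ t = "Dallas Mavericks" ∨ t = "Houston Rockets" ∨ t = "New Orleans Pelicans" ∨ t = "Memphis Grizzlies" then
      [("team", t), ("conf", "West"), ("div", "Southwest")] else out_entry
  let out_entry := if t = "Miami Heat" ∨ t = "Orlando Magic" ∨ t = "Atlanta Hawks" ∨ t = "Charlotte Hornets" ∨ t = "Washington Wizards" then
      [("team", t), ("conf", "East"), ("div", "Southeast")] else out_entry
  let out_entry := if t = "Milwaukee Bucks" ∨ t = "Chicago Bulls" ∨ t = "Indiana Pacers" ∨ t = "Detroit Pistons" ∨ t = "Cleveland Cavaliers" then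
      [("team", t), ("conf", "East"), ("div", "Central")] else out_entry
  let out_entry := if t = "Toronto Raptors" ∨ t = "Boston Celtics" ∨ t = "Brooklyn Nets" ∨ t = "Philadelphia 76ers" ∨ t = "New York Knicks" then
      [("team", t), ("conf", "East"), ("div", "Atlantic")] else out_entry
  out_entry

def set_conference_divisions (teams : List String) : List (List (String × String)) :=
  teams.foldl (fun out t => out ++ [pvAEntry t]) []

-- ===== PORT B =====
-- the flat roster, 30 teams in division order (Source B's _ROSTER)
def pvRoster : List String :=
  [ "Sacramento Kings", "Golden State Warriors", "LA Clippers", "Los Angeles Lakers", "Phoenix Suns",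
    "Portland Trail Blazers", "Utah Jazz", "Denver Nuggets", "Oklahoma City Thunder", "Minnesota Timberwolves",
    "San Antonio Spurs", "Dallas Mavericks", "Houston Rockets", "New Orleans Pelicans", "Memphis Grizzlies",
    "Miami Heat", "Orlando Magic", "Atlanta Hawks", "Charlotte Hornets", "Washington Wizards",
    "Milwaukee Bucks", "Chicago Bulls", "Indiana Pacers", "Detroit Pistons", "Cleveland Cavaliers",
    "Toronto Raptors", "Boston Celtics", "Brooklyn Nets", "Philadelphia 76ers", "New York Knicks" ]

def pvDivNames : List String :=
  ["Pacific", "Northwest", "Southwest", "Southeast", "Central", "Atlantic"]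

-- loop body of Source B: roster index (try/except .index → index?), then arithmetic;
-- i : Nat with i < 30, so Nat division i/5 equals Python's i // 5 and the getD
-- default is unreachable (i/5 < 6 = pvDivNames.length)
def pvBEntry (t : String) : List (String × String) :=
  match PySem.List.index? pvRoster t with
  | none => [("error", "team name missing")]
  | some i => [("team", t), ("conf", if i < 15 then "West" else "East"), ("div", pvDivNames.getD (i / 5) "")]

def set_conference_divisions_alt (teams : List String) : List (List (String × String)) :=
  teams.foldl (fun out t => out ++ [pvBEntry t]) []

-- ===== PRECONDITION & SPEC =====
def Spec_set_conference_divisions (teams : List String) (out : List (List (String × String))) : Prop := out = set_conference_divisions_alt teams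
instance (teams : List String) (out : List (List (String × String))) : Decidable (Spec_set_conference_divisions teams out) := by unfold Spec_set_conference_divisions; infer_instance

-- ===== CLAIM (what is proved, stated in full; the proofs are below) =====
def Claim_equal_set_conference_divisions : Prop := ∀ (teams : List String), Dom_set_conference_divisions teams → Spec_set_conference_divisions teams (set_conference_divisions teams)

-- ===== LEMMAS AND PROOFS =====
set_option maxRecDepth 100000 in
theorem pvEntry_eq (t : String) : pvAEntry t = pvBEntry t := by
  by_cases h1 : t = "Sacramento Kings" ∨ t = "Golden State Warriors" ∨ t = "LA Clippers" ∨ t = "Los Angeles Lakers" ∨ t = "Phoenix Suns"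
  · rcases h1 with h | h | h | h | h <;> subst h <;> decide
  by_cases h2 : t = "Portland Trail Blazers" ∨ t = "Utah Jazz" ∨ t = "Denver Nuggets" ∨ t = "Oklahoma City Thunder" ∨ t = "Minnesota Timberwolves"
  · rcases h2 with h | h | h | h | h <;> subst h <;> decide
  by_cases h3 : t = "San Antonio Spurs" ∨ t = "Dallas Mavericks" ∨ t = "Houston Rockets" ∨ t = "New Orleans Pelicans" ∨ t = "Memphis Grizzlies"
  · rcases h3 with h | h | h | h | h <;> subst h <;> decide
  by_cases h4 : t = "Miami Heat" ∨ t = "Orlando Magic" ∨ t = "Atlanta Hawks" ∨ t = "Charlotte Hornets" ∨ t = "Washington Wizards"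
  · rcases h4 with h | h | h | h | h <;> subst h <;> decide
  by_cases h5 : t = "Milwaukee Bucks" ∨ t = "Chicago Bulls" ∨ t = "Indiana Pacers" ∨ t = "Detroit Pistons" ∨ t = "Cleveland Cavaliers"
  · rcases h5 with h | h | h | h | h <;> subst h <;> decide
  by_cases h6 : t = "Toronto Raptors" ∨ t = "Boston Celtics" ∨ t = "Brooklyn Nets" ∨ t = "Philadelphia 76ers" ∨ t = "New York Knicks"
  · rcases h6 with h | h | h | h | h <;> subst h <;> decide
  · have hA : pvAEntry t = [("error", "team name missing")] := by
      simp only [pvAEntry]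
      rw [if_neg h6, if_neg h5, if_neg h4, if_neg h3, if_neg h2, if_neg h1]
    have hmem : t ∉ pvRoster := by
      simp only [pvRoster, List.mem_cons, List.not_mem_nil, or_false, not_or]
      tauto
    have hB : pvBEntry t = [("error", "team name missing")] := by
      unfold pvBEntry
      rw [(PySem.List.index?_eq_none_iff pvRoster t).mpr hmem]
    rw [hA, hB]

-- ===== VERDICT (by name: the statement is the Claim_ definition above) =====
theorem set_conference_divisions_spec : Claim_equal_set_conference_divisions := by
  intro teams _
  show _ = _
  unfold set_conference_divisions set_conference_divisions_alt
  rw [PySem.List.foldl_append_singleton_eq_map, PySem.List.foldl_append_singleton_eq_map]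
  exact congrArg _ (List.map_congr_left fun t _ => pvEntry_eq t)
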